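-- pv_equiv track=rewrite | github.com/pablomoreno-jpg/pp_lab1_Moreno_pablo | laboratorio 1 parcial/moreno_pablo_pp1_biblioteca.py | buscar_cantidad_de_posiciones_de_jugadores
-- ===== SOURCE A (Python) =====
-- def buscar_cantidad_de_posiciones_de_jugadores(lista_jugadores:list) -> dict:
--
--     """
--     busca la cantidades de
--     jugadores que hay en cada
--     jugador de la lista
--
--     lista_jugadores: es la
--     lista en donde se van
--     a buscar las posiciones
--
--     retorno:
--     devuelve un diccionario
--     que tinene la posicion como
--     clave y la cantidad de jugadores
--     que se encontro en la posicion
--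
--     """
--
--     dict_posiciones = {}
--
--     if len(lista_jugadores):
--
--         for elemento in lista_jugadores:
--
--             if elemento["posicion"] in dict_posiciones:
--
--                 dict_posiciones[elemento["posicion"]] += 1
--
--             else:
--
--                 dict_posiciones[elemento["posicion"]] = 1
--
--     return dict_posiciones
-- ===== SOURCE B (Python) =====
-- def buscar_cantidad_de_posiciones_de_jugadores(lista_jugadores: list) -> dict:
--     posiciones = list(dict.fromkeys(e["posicion"] for e in lista_jugadores))
--     return {pos: sum(1 for e in lista_jugadores if e["posicion"] == pos) for pos in posiciones}
-- ===== Notes on version B (the rewrite author's own statement) =====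
-- stated objective: alternative
-- what changed: Replaces A's single incremental counter-dict accumulation with a two-phase pass: build the ordered list of distinct positions first, then count each position's occurrences with a separate scan.
import Mathlib
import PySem

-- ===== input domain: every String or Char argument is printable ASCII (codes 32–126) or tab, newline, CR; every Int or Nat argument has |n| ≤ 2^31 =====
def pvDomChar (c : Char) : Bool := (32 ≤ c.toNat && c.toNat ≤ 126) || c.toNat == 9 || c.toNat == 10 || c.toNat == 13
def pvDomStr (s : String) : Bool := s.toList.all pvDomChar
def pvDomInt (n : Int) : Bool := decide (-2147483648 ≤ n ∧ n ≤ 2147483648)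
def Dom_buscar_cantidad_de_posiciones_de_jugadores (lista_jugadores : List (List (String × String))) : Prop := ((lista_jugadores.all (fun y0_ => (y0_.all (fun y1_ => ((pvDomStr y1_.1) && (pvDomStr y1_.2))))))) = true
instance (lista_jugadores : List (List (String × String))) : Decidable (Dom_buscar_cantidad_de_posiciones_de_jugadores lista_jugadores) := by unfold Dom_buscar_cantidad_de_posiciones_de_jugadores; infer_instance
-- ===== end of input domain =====

-- B replaces A's incremental counter dict with a build-distinct-keys-then-count-each-key
-- formulation (objective: alternative decomposition, same observable result).

-- ===== PORT A =====
-- elemento["posicion"]; Pre_ guarantees the key is present, so getD's default is never used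
def buscar_cantidad_de_posiciones_de_jugadores (lista_jugadores : List (List (String × String))) : List (String × Int) :=
  let dict_posiciones : PySem.Dict String Int := PySem.Dict.empty
  let dict_posiciones :=
    if lista_jugadores.length ≠ 0 then
      lista_jugadores.foldl (fun d elemento =>
        let pos := (PySem.Dict.mk elemento).getD "posicion" ""
        if d.contains pos then d.modify pos 0 (· + 1)
        else d.insert pos 1) dict_posiciones
    else dict_posiciones
  dict_posiciones.items

-- ===== PORT B =====
def buscar_cantidad_de_posiciones_de_jugadores_alt (lista_jugadores : List (List (String × String))) : List (String × Int) :=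
  let posiciones := PySem.List.dedup (lista_jugadores.map (fun e => (PySem.Dict.mk e).getD "posicion" ""))
  posiciones.map (fun pos =>
    (pos, ((lista_jugadores.filter (fun e => (PySem.Dict.mk e).getD "posicion" "" == pos)).length : Int)))

-- ===== PRECONDITION & SPEC =====
-- Pre_ excludes players missing the "posicion" key, on which A raises KeyError.
def Pre_buscar_cantidad_de_posiciones_de_jugadores (lista_jugadores : List (List (String × String))) : Prop :=
  (lista_jugadores.all (fun e => (PySem.Dict.mk e).contains "posicion")) = true
instance (lista_jugadores : List (List (String × String))) : Decidable (Pre_buscar_cantidad_de_posiciones_de_jugadores lista_jugadores) := by unfold Pre_buscar_cantidad_de_posiciones_de_jugadores; infer_instance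
def pvWitness_buscar_cantidad_de_posiciones_de_jugadores : (List (List (String × String))) :=
  [[("posicion", "A"), ("nombre", "x")], [("posicion", "B")], [("posicion", "A")]]
def Spec_buscar_cantidad_de_posiciones_de_jugadores (lista_jugadores : List (List (String × String))) (out : List (String × Int)) : Prop := out = buscar_cantidad_de_posiciones_de_jugadores_alt lista_jugadores
instance (lista_jugadores : List (List (String × String))) (out : List (String × Int)) : Decidable (Spec_buscar_cantidad_de_posiciones_de_jugadores lista_jugadores out) := by unfold Spec_buscar_cantidad_de_posiciones_de_jugadores; infer_instance

-- ===== CLAIM (what is proved, stated in full; the proofs are below) =====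
def Claim_equal_buscar_cantidad_de_posiciones_de_jugadores : Prop := ∀ (lista_jugadores : List (List (String × String))), Dom_buscar_cantidad_de_posiciones_de_jugadores lista_jugadores → Pre_buscar_cantidad_de_posiciones_de_jugadores lista_jugadores → Spec_buscar_cantidad_de_posiciones_de_jugadores lista_jugadores (buscar_cantidad_de_posiciones_de_jugadores lista_jugadores)

-- ===== LEMMAS AND PROOFS =====
-- A's loop body (check-then-modify-or-insert) is extensionally the Counter step.
lemma stepA_eq_counter_step (d : PySem.Dict String Int) (k : String) :
    (if d.contains k then d.modify k 0 (· + 1) else d.insert k 1) = d.modify k 0 (· + 1) := by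
  by_cases h : d.contains k = true
  · simp [h]
  · simp only [Bool.not_eq_true] at h
    simp [h, PySem.Dict.insert, PySem.Dict.modify]
    rw [PySem.Dict.getD_of_not_contains]
    exact h

lemma foldlA_eq_counter (l : List (List (String × String))) (d : PySem.Dict String Int) :
    l.foldl (fun d e =>
        let pos := (PySem.Dict.mk e).getD "posicion" ""
        if d.contains pos then d.modify pos 0 (· + 1) else d.insert pos 1) d
    = (l.map (fun e => (PySem.Dict.mk e).getD "posicion" "")).foldl
        (fun d x => d.modify x 0 (· + 1)) d := by
  simp only [stepA_eq_counter_step]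
  rw [List.foldl_map]

theorem buscar_cantidad_de_posiciones_de_jugadores_spec : Claim_equal_buscar_cantidad_de_posiciones_de_jugadores := by
  intro l _ _
  unfold Spec_buscar_cantidad_de_posiciones_de_jugadores
  unfold buscar_cantidad_de_posiciones_de_jugadores buscar_cantidad_de_posiciones_de_jugadores_alt
  by_cases hl : l.length ≠ 0
  · simp only [foldlA_eq_counter, ← PySem.Dict.counter_eq_foldl]
    rw [if_pos hl, PySem.Dict.items_counter]
    simp only [PySem.List.dedup_eq_ofList]
    refine List.map_congr_left fun k _ => ?_
    rw [List.count_eq_countP, List.countP_map, List.countP_eq_length_filter]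
    rfl
  · simp only [ne_eq, Decidable.not_not] at hl
    rw [List.length_eq_zero_iff] at hl
    subst hl
    rfl
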